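-- pv_equiv track=rewrite | github.com/kkimhyeran/Algorithms_ran2 | 프로그래머스/1/140108. 문자열 나누기/문자열 나누기.py | solution
-- ===== SOURCE A (Python) =====
-- def solution(s):
--
--     answer = 0
--
--     x = s[0]
--     x_cnt = 1
--
--     not_x_cnt = 0
--
--     for i in range(1, len(s)):
--
--         if x_cnt == not_x_cnt:
--             answer += 1
--             x = s[i]
--
--
--         if s[i] == x:
--             x_cnt += 1
--         else:
--             not_x_cnt += 1
--
--
--
--     return answer + 1
-- ===== SOURCE B (Python) =====
-- def solution(s):
--     answer = 0
--     i = 0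
--     n = len(s)
--     while i < n:
--         x = s[i]
--         bal = 0
--         j = i
--         while j < n:
--             bal += 1 if s[j] == x else -1
--             j += 1
--             if bal == 0:
--                 break
--         answer += 1
--         i = j
--     return answer
-- ===== Notes on version B (the rewrite author's own statement) =====
-- stated objective: alternative
-- what changed: B replaces A's single flat pass with two never-reset cumulative counters and an unconditional trailing +1 by a segment-stripping double loop: an outer loop peels one segment at a time, an inner scan keeps a single signed balance and breaks when it hits zero, and the answer is simply one per peeled segment.
import Mathlib
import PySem

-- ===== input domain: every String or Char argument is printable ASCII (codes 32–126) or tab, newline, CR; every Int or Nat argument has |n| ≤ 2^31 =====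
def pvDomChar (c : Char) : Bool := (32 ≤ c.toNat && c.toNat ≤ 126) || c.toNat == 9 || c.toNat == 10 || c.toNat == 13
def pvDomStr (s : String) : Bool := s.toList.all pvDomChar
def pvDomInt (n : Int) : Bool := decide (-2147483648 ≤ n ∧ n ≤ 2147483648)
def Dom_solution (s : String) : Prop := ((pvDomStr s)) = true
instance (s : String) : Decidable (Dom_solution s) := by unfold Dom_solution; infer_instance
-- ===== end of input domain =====

-- B replaces A's flat pass with cumulative counters and an unconditional trailing +1 by a
-- segment-stripping double loop (outer loop per segment, inner signed-balance scan with break);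
-- objective: alternative. Pre_ excludes only the empty string, on which A raises IndexError.


-- ===== PORT A =====
-- state: (answer, x, x_cnt, not_x_cnt); one step of A's for-loop body
def solAStep (st : Int × Char × Int × Int) (c : Char) : Int × Char × Int × Int :=
  let (a, x, p, q) := st
  let (a, x) := if p = q then (a + 1, c) else (a, x)
  if c = x then (a, x, p + 1, q) else (a, x, p, q + 1)

def solution (s : String) : Int :=
  match s.toList with
  | [] => 0        -- Python raises IndexError here (excluded by Pre_solution)
  | x0 :: rest =>
    let (a, _, _, _) := rest.foldl solAStep (0, x0, 1, 0)
    a + 1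

-- ===== PORT B =====
-- inner while-loop: scans with signed balance `bal`, returns the number of characters
-- consumed (j - i in Source B); stops (break) when the balance reaches zero
def solBInner (x : Char) : List Char → Int → Nat
  | [], _ => 0
  | c :: t, bal =>
    let bal := bal + (if c = x then 1 else -1)
    if bal = 0 then 1 else 1 + solBInner x t bal

-- the inner loop consumes at least one character of a nonempty list (used for termination)
theorem solBInner_pos (x c : Char) (t : List Char) (b : Int) :
    1 ≤ solBInner x (c :: t) b := by
  rw [solBInner]
  split <;> split <;> omega

-- outer while-loop: peel one segment, count 1, continue on the rest
def solAltGo (l : List Char) : Int :=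
  match l with
  | [] => 0
  | x :: t => 1 + solAltGo ((x :: t).drop (solBInner x (x :: t) 0))
termination_by l.length
decreasing_by
  have h := solBInner_pos x x t 0
  simp only [List.length_drop, List.length_cons]
  omega

def solution_alt (s : String) : Int := solAltGo s.toList

-- ===== PRECONDITION & SPEC =====
-- Pre_ excludes the empty string, on which A raises IndexError at s[0].
def Pre_solution (s : String) : Prop := s ≠ ""
instance (s : String) : Decidable (Pre_solution s) := by unfold Pre_solution; infer_instance
def pvWitness_solution : String := "aabbacca"

def Spec_solution (s : String) (out : Int) : Prop := out = solution_alt s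
instance (s : String) (out : Int) : Decidable (Spec_solution s out) := by unfold Spec_solution; infer_instance

-- ===== CLAIM (what is proved, stated in full; the proofs are below) =====
def Claim_equal_solution : Prop := ∀ (s : String), Dom_solution s → Pre_solution s → Spec_solution s (solution s)

-- ===== LEMMAS AND PROOFS =====

-- drop of 1+k on a cons (used to line the two sides up)
theorem drop_one_add {α : Type} (c : α) (t : List α) (k : Nat) :
    List.drop (1 + k) (c :: t) = List.drop k t := by
  rw [Nat.add_comm]
  exact List.drop_succ_cons

-- Main invariant, by one induction on the remaining list l.
-- First conjunct: A at a segment boundary (x_cnt = not_x_cnt) behaves like B starting fresh on l.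
-- Second conjunct: A mid-segment with balance p - q behaves like B's inner scan started at p - q.
theorem solAB (l : List Char) : ∀ (a : Int) (x : Char) (p q : Int),
    (p = q → (l.foldl solAStep (a, x, p, q)).1 + 1 = a + 1 + solAltGo l) ∧
    (p ≠ q → (l.foldl solAStep (a, x, p, q)).1 + 1
        = a + 1 + solAltGo (l.drop (solBInner x l (p - q)))) := by
  induction l with
  | nil =>
    intro a x p q
    refine ⟨fun _ => ?_, fun _ => ?_⟩ <;> simp [solAltGo, solBInner]
  | cons c t ih =>
    intro a x p q
    constructor
    · intro hpq
      -- A's step: answer+1, x := c, then c = x so x_cnt+1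
      have hstep : solAStep (a, x, p, q) c = (a + 1, c, p + 1, q) := by
        simp [solAStep, hpq]
      rw [List.foldl_cons, hstep]
      have hne : p + 1 ≠ q := by omega
      have hM := (ih (a + 1) c (p + 1) q).2 hne
      have hbal : p + 1 - q = 1 := by omega
      rw [hM, hbal]
      -- unfold B one outer step on c :: t
      have hInner : solBInner c (c :: t) 0 = 1 + solBInner c t 1 := by
        simp [solBInner]
      rw [solAltGo, hInner, drop_one_add]
      ring
    · intro hpq
      by_cases hc : c = x
      · have hstep : solAStep (a, x, p, q) c = (a, x, p + 1, q) := by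
          simp [solAStep, hpq, hc]
        rw [List.foldl_cons, hstep]
        have hInner : solBInner x (c :: t) (p - q)
            = if p + 1 - q = 0 then 1 else 1 + solBInner x t (p + 1 - q) := by
          simp [solBInner, hc]
          congr 2 <;> (try ring_nf)
        by_cases hz : p + 1 = q
        · -- balance reaches zero: boundary for A on the next step, B breaks here
          have := (ih a x (p + 1) q).1 hz
          rw [this, hInner]
          simp [show p + 1 - q = 0 by omega]
        · have := (ih a x (p + 1) q).2 hz
          rw [this, hInner]
          simp only [show ¬ (p + 1 - q = 0) by omega, if_false, drop_one_add]
      · have hstep : solAStep (a, x, p, q) c = (a, x, p, q + 1) := by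
          simp [solAStep, hpq, hc]
        rw [List.foldl_cons, hstep]
        have hInner : solBInner x (c :: t) (p - q)
            = if p - (q + 1) = 0 then 1 else 1 + solBInner x t (p - (q + 1)) := by
          simp [solBInner, hc]
          congr 2 <;> (try ring_nf)
        by_cases hz : p = q + 1
        · have := (ih a x p (q + 1)).1 hz
          rw [this, hInner]
          simp [show p - (q + 1) = 0 by omega]
        · have := (ih a x p (q + 1)).2 hz
          rw [this, hInner]
          simp only [show ¬ (p - (q + 1) = 0) by omega, if_false, drop_one_add]

-- ===== VERDICT (by name: the statement is the Claim_ definition above) =====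
theorem solution_spec : Claim_equal_solution := by
  intro s _ hpre
  unfold Spec_solution solution solution_alt
  have hne : s.toList ≠ [] := by
    intro h
    simp only [String.toList_eq_nil_iff] at h
    exact hpre h
  obtain ⟨x0, rest, hlist⟩ := List.exists_cons_of_ne_nil hne
  rw [hlist]
  dsimp only
  have hM := (solAB rest 0 x0 1 0).2 (by omega)
  have hInner : solBInner x0 (x0 :: rest) 0 = 1 + solBInner x0 rest 1 := by
    simp [solBInner]
  rw [solAltGo, hInner, drop_one_add]
  simp only [show (1 : Int) - 0 = 1 by ring] at hM
  rw [hM]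
  ring
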